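-- pv_equiv track=rewrite | github.com/CyberiaResurrection/traveller_pyroute | PyRoute/Inputs/StarlineTransformer.py | _square_up_allegiance_overflow
-- ===== SOURCE A (Python) =====
-- def _square_up_allegiance_overflow(parsed):
--     alleg = parsed['allegiance']
--     if '----' == alleg or '--' == alleg:
--         return parsed
--
--     if alleg.startswith('----') and 4 <= len(alleg):
--         parsed['allegiance'] = '----'
--         parsed['residual'] = alleg[4:] + parsed['residual']
--     elif alleg.startswith('--') and 2 <= len(alleg):
--         parsed['allegiance'] = '--'
--         parsed['residual'] = alleg[2:] + parsed['residual']
--     else: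
--         counter = 0
--         while counter < len(alleg) and (alleg[counter].isalnum() or '-' == alleg[counter] or '?' == alleg[counter]) and 4 > counter:
--             counter += 1
--         if counter < len(alleg):
--             spacer = ' ' if parsed['residual'] != '' else ''
--             parsed['allegiance'] = alleg[:counter]
--             parsed['residual'] = alleg[counter:] + spacer + parsed['residual']
--     return parsed
-- ===== SOURCE B (Python) =====
-- def _square_up_allegiance_overflow(parsed):
--     # Right-to-left peel: pop trailing chars of the allegiance into an accumulator
--     # until what remains is a legal allegiance, then rebuild both fields once.
--     alleg = parsed['allegiance']
--     chars, moved = list(alleg), []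
--     if alleg.startswith('--'):
--         keep = 4 if alleg.startswith('----') else 2
--         while len(chars) > keep:
--             moved.append(chars.pop())
--         spaced = False
--     else:
--         while len(chars) > 4 or not all(c.isalnum() or c in '-?' for c in chars):
--             moved.append(chars.pop())
--         spaced = True
--     if moved:
--         spacer = ' ' if spaced and parsed['residual'] else ''
--         parsed['allegiance'] = ''.join(chars)
--         parsed['residual'] = ''.join(reversed(moved)) + spacer + parsed['residual']
--     return parsed
-- ===== Notes on version B (the rewrite author's own statement) =====
-- stated objective: alternative
-- what changed: B abandons A's forward counter scan and per-branch slice assignments: it converts the allegiance to a char list and peels characters off the RIGHT end (list.pop) into a 'moved' accumulator until the remainder is a legal allegiance (length bound, or dash prefix kept), then rebuilds both fields once from the peeled pieces; no prefix index is ever computed or sliced.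
import Mathlib
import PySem

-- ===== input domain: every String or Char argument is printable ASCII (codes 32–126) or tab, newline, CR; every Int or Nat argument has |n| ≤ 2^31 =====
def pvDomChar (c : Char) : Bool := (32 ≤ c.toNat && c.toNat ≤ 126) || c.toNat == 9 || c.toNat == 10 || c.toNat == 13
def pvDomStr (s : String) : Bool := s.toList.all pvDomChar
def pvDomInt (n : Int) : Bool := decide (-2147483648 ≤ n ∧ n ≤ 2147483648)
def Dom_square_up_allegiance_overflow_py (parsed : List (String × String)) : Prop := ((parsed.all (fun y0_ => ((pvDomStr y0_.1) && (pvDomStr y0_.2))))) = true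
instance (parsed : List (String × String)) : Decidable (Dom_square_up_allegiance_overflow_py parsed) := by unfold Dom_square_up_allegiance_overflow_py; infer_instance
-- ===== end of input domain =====

-- B replaces A's forward counter scan and per-branch slice assignments by peeling characters
-- off the RIGHT end of the allegiance into an accumulator until the remainder is legal, then
-- rebuilding both fields once; equivalence is proved for the return value (in Python both
-- versions mutate the dict argument identically).

-- ===== PORT A =====
-- `alleg[counter].isalnum() or '-' == alleg[counter] or '?' == alleg[counter]` (A's loop test; B's `all` uses the same predicate)
def pvAllowed (c : Char) : Bool := PySem.Chars.isalnum c || c == '-' || c == '?'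

-- A's while loop: `while counter < len(alleg) and (… allowed …) and 4 > counter: counter += 1`
def pvScanA (cs : List Char) (counter : Nat) : Nat :=
  if h : counter < cs.length ∧ pvAllowed (cs.getD counter ' ') = true ∧ counter < 4 then
    pvScanA cs (counter + 1)
  else counter
termination_by cs.length - counter
decreasing_by have := h.1; omega

def square_up_allegiance_overflow_py (parsed : List (String × String)) : List (String × String) :=
  let d := PySem.Dict.mk parsed
  match d.get? "allegiance" with
  | none => parsed  -- KeyError in Python; outside Pre_
  | some alleg =>
    if "----" = alleg ∨ "--" = alleg then parsed
    else if PySem.Str.startswith alleg "----" = true ∧ (4 : Int) ≤ PySem.Str.len alleg then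
      match d.get? "residual" with
      | none => parsed  -- KeyError in Python; outside Pre_
      | some res =>
        ((d.insert "allegiance" "----").insert "residual"
          (String.ofList ((PySem.Str.slice alleg (some 4) none).toList ++ res.toList))).items
    else if PySem.Str.startswith alleg "--" = true ∧ (2 : Int) ≤ PySem.Str.len alleg then
      match d.get? "residual" with
      | none => parsed  -- KeyError in Python; outside Pre_
      | some res =>
        ((d.insert "allegiance" "--").insert "residual"
          (String.ofList ((PySem.Str.slice alleg (some 2) none).toList ++ res.toList))).items
    else
      let counter := pvScanA alleg.toList 0
      if counter < alleg.toList.length then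
        match d.get? "residual" with
        | none => parsed  -- KeyError in Python; outside Pre_
        | some res =>
          let spacer : String := if res ≠ "" then " " else ""
          ((d.insert "allegiance" (PySem.Str.slice alleg none (some (counter : Int)))).insert "residual"
            (String.ofList ((PySem.Str.slice alleg (some (counter : Int)) none).toList ++ spacer.toList ++ res.toList))).items
      else parsed

-- ===== PORT B =====
-- B's dash-branch loop: `while len(chars) > keep: moved.append(chars.pop())`
def pvPeelKeep (chars moved : List Char) (keep : Nat) : List Char × List Char :=
  if h : keep < chars.length then
    pvPeelKeep chars.dropLast (moved ++ [chars.getLast (by rintro rfl; simp at h)]) keep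
  else (chars, moved)
termination_by chars.length
decreasing_by simp [List.length_dropLast]; omega

-- B's scan-branch loop: `while len(chars) > 4 or not all(… allowed …): moved.append(chars.pop())`
def pvPeelScan (chars moved : List Char) : List Char × List Char :=
  if h : 4 < chars.length ∨ ¬ chars.all pvAllowed = true then
    pvPeelScan chars.dropLast (moved ++ [chars.getLast (by rintro rfl; simp at h)])
  else (chars, moved)
termination_by chars.length
decreasing_by simp [List.length_dropLast]; rcases h with h | h; · omega
              · rcases chars with _ | _; · simp at h
                · simp

def square_up_allegiance_overflow_py_alt (parsed : List (String × String)) : List (String × String) :=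
  let d := PySem.Dict.mk parsed
  match d.get? "allegiance" with
  | none => parsed  -- KeyError in Python; outside Pre_
  | some alleg =>
    let cs := alleg.toList
    -- ((chars, moved), spaced) after the chosen peel loop
    let pm : (List Char × List Char) × Bool :=
      if PySem.Str.startswith alleg "--" = true then
        (pvPeelKeep cs [] (if PySem.Str.startswith alleg "----" = true then 4 else 2), false)
      else (pvPeelScan cs [], true)
    if pm.1.2 ≠ [] then
      match d.get? "residual" with
      | none => parsed  -- KeyError in Python; outside Pre_
      | some res =>
        let spacer : List Char := if pm.2 = true ∧ res ≠ "" then [' '] else []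
        ((d.insert "allegiance" (String.ofList pm.1.1)).insert "residual"
          (String.ofList (pm.1.2.reverse ++ spacer ++ res.toList))).items
    else parsed

-- ===== PRECONDITION & SPEC =====
-- an allegiance value on which A performs no overflow split (and so never touches 'residual')
def pvNoOverflow (a : String) : Bool :=
  a == "----" || a == "--" ||
    (!PySem.Str.startswith a "--" && a.toList.length ≤ 4 && a.toList.all pvAllowed)

-- Pre_ excludes exactly the inputs on which A raises KeyError: those missing the 'allegiance'
-- key, and those missing the 'residual' key whose allegiance value overflows.
def Pre_square_up_allegiance_overflow_py (parsed : List (String × String)) : Prop :=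
  "allegiance" ∈ parsed.map Prod.fst ∧
    ("residual" ∈ parsed.map Prod.fst ∨
      pvNoOverflow (((PySem.Dict.mk parsed).get? "allegiance").getD "") = true)
instance (parsed : List (String × String)) : Decidable (Pre_square_up_allegiance_overflow_py parsed) := by unfold Pre_square_up_allegiance_overflow_py; infer_instance
def pvWitness_square_up_allegiance_overflow_py : (List (String × String)) := [("allegiance", "AB?Cx!"), ("residual", "r")]

def Spec_square_up_allegiance_overflow_py (parsed : List (String × String)) (out : List (String × String)) : Prop := out = square_up_allegiance_overflow_py_alt parsed
instance (parsed : List (String × String)) (out : List (String × String)) : Decidable (Spec_square_up_allegiance_overflow_py parsed out) := by unfold Spec_square_up_allegiance_overflow_py; infer_instance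

-- ===== CLAIM (what is proved, stated in full; the proofs are below) =====
def Claim_equal_square_up_allegiance_overflow_py : Prop := ∀ (parsed : List (String × String)), Dom_square_up_allegiance_overflow_py parsed → Pre_square_up_allegiance_overflow_py parsed → Spec_square_up_allegiance_overflow_py parsed (square_up_allegiance_overflow_py parsed)

-- ===== LEMMAS AND PROOFS =====

theorem pv_takeWhile_take (p : Char → Bool) (l : List Char) (n : Nat) :
    ((l.take n).takeWhile p).length = min (l.takeWhile p).length n := by
  induction l generalizing n with
  | nil => simp
  | cons a l ih =>
    cases n with
    | zero => simp
    | succ n =>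
      simp only [List.take_succ_cons, List.takeWhile_cons]
      by_cases h : p a <;> simp [h, ih]

theorem pv_all_iff_tw (p : Char → Bool) (l : List Char) :
    l.all p = true ↔ (l.takeWhile p).length = l.length := by
  induction l with
  | nil => simp
  | cons a l ih =>
    by_cases h : p a
    · simpa [h, List.takeWhile_cons] using ih
    · have := (l.takeWhile_sublist (p := p)).length_le
      simp [h]

theorem pvScanA_eq (cs : List Char) (n : Nat) (h4 : n ≤ 4) (hl : n ≤ cs.length) :
    pvScanA cs n = min (n + ((cs.drop n).takeWhile pvAllowed).length) (min 4 cs.length) := by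
  unfold pvScanA
  split
  · rename_i h
    obtain ⟨h1, h2, h3⟩ := h
    rw [pvScanA_eq cs (n + 1) (by omega) (by omega)]
    rw [List.drop_eq_getElem_cons h1, List.takeWhile_cons,
      if_pos (by rwa [List.getD_eq_getElem _ _ h1] at h2)]
    simp only [List.length_cons]
    omega
  · rename_i h
    rw [Decidable.not_and_iff_not_or_not, Decidable.not_and_iff_not_or_not] at h
    by_cases he : n < cs.length
    · rcases Nat.lt_or_ge n 4 with h4' | h4'
      · have hna : ¬ pvAllowed (cs.getD n ' ') = true := by
          rcases h with h | h | h
          · exact absurd he h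
          · exact h
          · omega
        rw [List.getD_eq_getElem _ _ he] at hna
        rw [List.drop_eq_getElem_cons he, List.takeWhile_cons, if_neg hna]
        simp; omega
      · have h44 : n = 4 := by omega
        have hlen5 : 4 < cs.length := by omega
        subst h44
        have := ((cs.drop 4).takeWhile_sublist (p := pvAllowed)).length_le
        simp at this ⊢
        omega
    · have hnl : n = cs.length := by omega
      have : cs.drop n = [] := List.drop_eq_nil_of_le (by omega)
      rw [this]; simp; omega
termination_by cs.length - n
decreasing_by omega

-- B's scan stopping point, as a function of the input
def pvKK (cs : List Char) : Nat := min (cs.takeWhile pvAllowed).length 4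

theorem pvScanA_eq_KK (cs : List Char) : pvScanA cs 0 = pvKK cs := by
  rw [pvScanA_eq cs 0 (by omega) (by omega), List.drop_zero, Nat.zero_add, pvKK]
  have := (List.takeWhile_sublist (l := cs) (p := pvAllowed)).length_le
  omega

theorem pv_split_step (cs : List Char) (hne : cs ≠ []) (K : Nat) (hK : K ≤ cs.length - 1)
    (m : List Char) :
    (cs.dropLast.take K, m ++ [cs.getLast hne] ++ (cs.dropLast.drop K).reverse)
      = (cs.take K, m ++ (cs.drop K).reverse) := by
  rcases List.eq_nil_or_concat cs with rfl | ⟨l, x, rfl⟩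
  · exact absurd rfl hne
  · have hKl : K ≤ l.length := by simp at hK; omega
    simp [List.take_append_of_le_length hKl, List.drop_append_of_le_length hKl]

theorem pvPeelKeep_eq (cs m : List Char) (keep : Nat) :
    pvPeelKeep cs m keep
      = (cs.take (min keep cs.length), m ++ (cs.drop (min keep cs.length)).reverse) := by
  unfold pvPeelKeep
  split
  · rename_i h
    have hne : cs ≠ [] := by rintro rfl; simp at h
    rw [pvPeelKeep_eq]
    have hmin : min keep cs.dropLast.length = keep := by
      simp [List.length_dropLast]; omega
    have hmin' : min keep cs.length = keep := by omega
    rw [hmin, hmin']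
    exact pv_split_step cs hne keep (by simp [List.length_dropLast] at hmin; omega) m
  · rename_i h
    have : min keep cs.length = cs.length := by omega
    simp [this]
termination_by cs.length
decreasing_by simp [List.length_dropLast]; rename_i h; omega

theorem pvPeelScan_eq (cs m : List Char) :
    pvPeelScan cs m = (cs.take (pvKK cs), m ++ (cs.drop (pvKK cs)).reverse) := by
  unfold pvPeelScan
  split
  · rename_i h
    have hne : cs ≠ [] := by rintro rfl; simp at h
    have hpos : 0 < cs.length := List.length_pos_of_ne_nil hne
    have htw := (List.takeWhile_sublist (l := cs) (p := pvAllowed)).length_le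
    have hcond : 4 < cs.length ∨ (cs.takeWhile pvAllowed).length ≠ cs.length := by
      rcases h with h | h
      · exact Or.inl h
      · exact Or.inr (fun he => h ((pv_all_iff_tw pvAllowed cs).mpr he))
    have hdl : cs.dropLast = cs.take (cs.length - 1) := by rw [List.dropLast_eq_take]
    have htw' : (cs.dropLast.takeWhile pvAllowed).length
        = min (cs.takeWhile pvAllowed).length (cs.length - 1) := by
      rw [hdl, pv_takeWhile_take]
    have hKdl : pvKK cs.dropLast = pvKK cs := by
      unfold pvKK; rw [htw']; omega
    have hKle : pvKK cs ≤ cs.length - 1 := by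
      unfold pvKK; omega
    rw [pvPeelScan_eq, hKdl]
    exact pv_split_step cs hne (pvKK cs) hKle m
  · rename_i h
    push Not at h
    obtain ⟨h1, h2⟩ := h
    have hK : pvKK cs = cs.length := by
      unfold pvKK
      have := (pv_all_iff_tw pvAllowed cs).mp (by simpa using h2)
      omega
    simp [hK]
termination_by cs.length
decreasing_by simp [List.length_dropLast]
              rcases cs with _ | ⟨c, cs⟩
              · rename_i h; simp at h
              · simp

-- startswith, translated to list prefixes
theorem pv_startswith_iff (s p : String) :
    PySem.Str.startswith s p = true ↔ p.toList <+: s.toList := by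
  rw [PySem.Str.startswith_eq, PySem.Chars.startswith_iff]

theorem pv_prefix_len_lt {s p : String} (h : PySem.Str.startswith s p = true) (hne : s ≠ p) :
    p.toList.length < s.toList.length := by
  rw [pv_startswith_iff] at h
  rcases Nat.lt_or_ge p.toList.length s.toList.length with hlt | hge
  · exact hlt
  · exfalso
    exact hne (String.toList_inj.mp (h.eq_of_length (by have := h.length_le; omega)).symm)

theorem pv_slice_from (s : String) (k : Int) (hk : 0 ≤ k) :
    (PySem.Str.slice s (some k) none).toList = s.toList.drop k.toNat := by
  simp [PySem.Str.toList_slice, PySem.List.slice_from _ hk]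

theorem pv_slice_to (s : String) (k : Int) (hk : 0 ≤ k) :
    PySem.Str.slice s none (some k) = String.ofList (s.toList.take k.toNat) := by
  apply String.toList_inj.mp
  simp [PySem.Str.toList_slice, PySem.List.slice_to _ hk]

theorem pv_sw4_sw2 {s : String} (h : PySem.Str.startswith s "----" = true) :
    PySem.Str.startswith s "--" = true := by
  rw [pv_startswith_iff] at h ⊢
  exact List.IsPrefix.trans (by decide) h

theorem pv_take_of_prefix {s p : String} (h : PySem.Str.startswith s p = true) :
    s.toList.take p.toList.length = p.toList :=
  (List.prefix_iff_eq_take.mp ((pv_startswith_iff s p).mp h)).symm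

-- ===== VERDICT (by name: the statement is the Claim_ definition above) =====
theorem square_up_allegiance_overflow_py_spec : Claim_equal_square_up_allegiance_overflow_py := by
  intro parsed _ _
  unfold Spec_square_up_allegiance_overflow_py
  cases hA : (PySem.Dict.mk parsed).get? "allegiance" with
  | none =>
    simp [square_up_allegiance_overflow_py, square_up_allegiance_overflow_py_alt, hA]
  | some alleg =>
    simp only [square_up_allegiance_overflow_py, square_up_allegiance_overflow_py_alt, hA]
    by_cases hsw2 : PySem.Str.startswith alleg "--" = true
    · by_cases hsw4 : PySem.Str.startswith alleg "----" = true
      · by_cases hs : alleg = "----"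
        · subst hs
          have h2 : PySem.Chars.startswith ['-','-','-','-'] ['-','-'] = true := by decide
          have h4 : PySem.Chars.startswith ['-','-','-','-'] ['-','-','-','-'] = true := by decide
          have hpeel : pvPeelKeep ['-','-','-','-'] [] 4 = (['-','-','-','-'], []) := by
            rw [pvPeelKeep_eq]; decide
          simp [h2, h4, hpeel]
        · -- alleg has a proper '----' prefix
          have hlen : 4 < alleg.toList.length := by
            have h := pv_prefix_len_lt hsw4 hs
            simpa using h
          have hne4 : ¬ ("----" = alleg ∨ "--" = alleg) := by
            rintro (h | h)
            · exact hs h.symm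
            · rw [← h] at hlen; simp at hlen
          have hall : "----" = String.ofList (alleg.toList.take 4) := by
            have ht := pv_take_of_prefix hsw4
            have h4 : "----".toList.length = 4 := by decide
            rw [h4] at ht
            rw [ht, String.ofList_toList]
          have hres4 : (PySem.Str.slice alleg (some 4) none).toList = alleg.toList.drop 4 := by
            rw [pv_slice_from _ _ (by omega)]; rfl
          have hlen' : 4 < alleg.length := by rwa [← String.length_toList]
          have hmin : min 4 alleg.toList.length = 4 := by omega
          have hdropne : alleg.toList.drop 4 ≠ [] := by
            simp [List.drop_eq_nil_iff]; omega
          have hpeel : pvPeelKeep alleg.toList [] 4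
              = (alleg.toList.take 4, (alleg.toList.drop 4).reverse) := by
            rw [pvPeelKeep_eq, hmin]; rfl
          simp only [hsw2, hsw4, if_neg hne4, if_true, hpeel]
          cases hR : (PySem.Dict.mk parsed).get? "residual" with
          | none => simp [Nat.le_of_lt hlen', hdropne]
          | some res => simp [Nat.le_of_lt hlen', hdropne, hres4, ← hall]
      · -- alleg has a proper '--' prefix (and no '----' prefix)
        by_cases hs : alleg = "--"
        · subst hs
          have h2 : PySem.Chars.startswith ['-','-'] ['-','-'] = true := by decide
          have h4 : PySem.Chars.startswith ['-','-'] ['-','-','-','-'] = false := by decide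
          have hpeel : pvPeelKeep ['-','-'] [] 2 = (['-','-'], []) := by
            rw [pvPeelKeep_eq]; decide
          simp [h2, h4, hpeel]
        · have hlen : 2 < alleg.toList.length := by
            have h := pv_prefix_len_lt hsw2 hs
            simpa using h
          have hne4 : ¬ ("----" = alleg ∨ "--" = alleg) := by
            rintro (h | h)
            · exact hsw4 (h ▸ (by decide : PySem.Str.startswith "----" "----" = true))
            · exact hs h.symm
          have hall : "--" = String.ofList (alleg.toList.take 2) := by
            have ht := pv_take_of_prefix hsw2
            have h2 : "--".toList.length = 2 := by decide
            rw [h2] at ht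
            rw [ht, String.ofList_toList]
          have hres2 : (PySem.Str.slice alleg (some 2) none).toList = alleg.toList.drop 2 := by
            rw [pv_slice_from _ _ (by omega)]; rfl
          have hlen' : 2 < alleg.length := by rwa [← String.length_toList]
          have hmin : min 2 alleg.toList.length = 2 := by omega
          have hdropne : alleg.toList.drop 2 ≠ [] := by
            simp [List.drop_eq_nil_iff]; omega
          have hpeel : pvPeelKeep alleg.toList [] 2
              = (alleg.toList.take 2, (alleg.toList.drop 2).reverse) := by
            rw [pvPeelKeep_eq, hmin]; rfl
          simp only [hsw2, hsw4, Bool.false_eq_true, if_false, if_neg hne4, if_true, hpeel]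
          cases hR : (PySem.Dict.mk parsed).get? "residual" with
          | none => simp [Nat.le_of_lt hlen', hdropne]
          | some res => simp [Nat.le_of_lt hlen', hdropne, hres2, ← hall]
    · -- no '--' prefix: A's counter scan vs B's right-to-left peel
      have hsw4 : ¬ PySem.Str.startswith alleg "----" = true := fun h => hsw2 (pv_sw4_sw2 h)
      have hne4 : ¬ ("----" = alleg ∨ "--" = alleg) := by
        rintro (h | h)
        · exact hsw2 (h ▸ (by decide : PySem.Str.startswith "----" "--" = true))
        · exact hsw2 (h ▸ (by decide : PySem.Str.startswith "--" "--" = true))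
      simp only [hsw2, hsw4, if_neg hne4, Bool.false_eq_true, if_false,
        pvScanA_eq_KK, pvPeelScan_eq]
      by_cases hk : pvKK alleg.toList < alleg.toList.length
      · have hk' : ¬ alleg.length ≤ pvKK alleg.toList := by
          rw [← String.length_toList]; omega
        have hto : PySem.Str.slice alleg none (some (pvKK alleg.toList : Int))
            = String.ofList (alleg.toList.take (pvKK alleg.toList)) := by
          rw [pv_slice_to _ _ (by omega)]; simp
        have hfrom : (PySem.Str.slice alleg (some (pvKK alleg.toList : Int)) none).toList
            = alleg.toList.drop (pvKK alleg.toList) := by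
          rw [pv_slice_from _ _ (by omega)]; simp
        have hdropne : alleg.toList.drop (pvKK alleg.toList) ≠ [] := by
          simp [List.drop_eq_nil_iff]; omega
        cases hR : (PySem.Dict.mk parsed).get? "residual" with
        | none => simp [hdropne]
        | some res =>
          by_cases hres : res = ""
          · subst hres; simp [hk', hdropne, hto, hfrom]
          · simp [hk', hres, hdropne, hto, hfrom]
      · have hk2 : ¬ pvKK alleg.toList < alleg.length := by
          rw [← String.length_toList]; exact hk
        have hdrop : alleg.toList.drop (pvKK alleg.toList) = [] := by
          rw [List.drop_eq_nil_iff]; omega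
        simp [hk2, hdrop]
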